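-- pv_equiv track=rewrite | github.com/HanGookOhLogic/CAAR-Projects- | sat_solver_bits.py | solution_to_coloring
-- ===== SOURCE A (Python) =====
-- def set_bit(int, b):
--     return (int | (1 << b))
--
-- def pixel_bit_to_int(p, b, N, B):
--     return (N*p[0] + p[1])*B + b + 1
--
-- def solution_to_coloring(solution, N, B, K):
--     coloring = [[0 for j in range(N)] for i in range(N)]
--     for i in range(N):
--         for j in range(N):
--             color = 0
--             for b in range(B):
--                 if solution[pixel_bit_to_int((i, j), b, N, B) - 1] > 0:
--                     color = set_bit(color, b)
--             coloring[i][j] = color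
--
--     return coloring
-- ===== SOURCE B (Python) =====
-- def _pack_bits(bits):
--     color = 0
--     for b, v in enumerate(bits):
--         if v > 0:
--             color |= 1 << b
--     return color
--
-- def solution_to_coloring(solution, N, B, K):
--     if N <= 0:
--         return []
--     nbits = max(B, 0)
--     colors = [_pack_bits(solution[c * nbits:(c + 1) * nbits]) for c in range(N * N)]
--     return [colors[r * N:(r + 1) * N] for r in range(N)]
-- ===== Notes on version B (the rewrite author's own statement) =====
-- stated objective: alternative
-- what changed: Replaces A's triple nested loops writing into a preallocated mutable grid via an index formula by a functional pipeline: slice the solution into per-cell chunks, pack each chunk into a color with an enumerate-based helper, then reshape the flat color list into rows with slices.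
import Mathlib
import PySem

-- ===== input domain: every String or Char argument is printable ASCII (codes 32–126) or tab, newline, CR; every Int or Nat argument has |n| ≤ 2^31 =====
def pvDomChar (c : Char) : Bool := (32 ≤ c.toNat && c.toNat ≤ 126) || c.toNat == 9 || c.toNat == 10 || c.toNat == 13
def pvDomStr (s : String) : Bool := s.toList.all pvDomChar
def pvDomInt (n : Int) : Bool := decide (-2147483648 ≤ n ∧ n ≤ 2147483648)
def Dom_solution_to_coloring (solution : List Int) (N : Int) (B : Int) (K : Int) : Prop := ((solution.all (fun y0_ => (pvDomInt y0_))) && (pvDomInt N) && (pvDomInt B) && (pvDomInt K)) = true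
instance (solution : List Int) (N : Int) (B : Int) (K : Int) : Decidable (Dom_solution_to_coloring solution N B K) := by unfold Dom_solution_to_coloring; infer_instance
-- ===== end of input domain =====

-- B replaces A's nested index loops over a mutable grid by a functional slice → pack → reshape pipeline (objective: alternative).

-- ===== PORT A =====
-- set_bit(int, b): b is always ≥ 0 here (it comes from range(B)), so `b.toNat` is exact
def set_bit (i : Int) (b : Int) : Int := PySem.Int.bor i ((1 : Int) <<< b.toNat)

def pixel_bit_to_int (p : Int × Int) (b : Int) (N : Int) (B : Int) : Int :=
  (N * p.1 + p.2) * B + b + 1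

def solution_to_coloring (solution : List Int) (N : Int) (B : Int) (K : Int) : List (List Int) :=
  let coloring : List (List Int) :=
    (PySem.List.pyRange 0 N 1).map (fun _ => (PySem.List.pyRange 0 N 1).map (fun _ => (0 : Int)))
  (PySem.List.pyRange 0 N 1).foldl (fun coloring i =>
    (PySem.List.pyRange 0 N 1).foldl (fun coloring j =>
      let color := (PySem.List.pyRange 0 B 1).foldl (fun color b =>
        if PySem.List.pyGetD solution (pixel_bit_to_int (i, j) b N B - 1) 0 > 0 then
          set_bit color b
        else color) 0
      -- coloring[i][j] = color  (indices are in range inside these loops, so pySetD/pyGetD are exact)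
      PySem.List.pySetD coloring i (PySem.List.pySetD (PySem.List.pyGetD coloring i []) j color))
      coloring) coloring

-- ===== PORT B =====
-- _pack_bits(bits): the enumerate index b is a nonnegative Int, so `.toNat` is exact
def pack_bits (bits : List Int) : Int :=
  (PySem.List.enumerate bits 0).foldl
    (fun (color : Int) (bv : Int × Int) =>
      if bv.2 > 0 then PySem.Int.bor color ((1 : Int) <<< bv.1.toNat) else color) 0

def solution_to_coloring_alt (solution : List Int) (N : Int) (B : Int) (K : Int) : List (List Int) :=
  if N ≤ 0 then []
  else
    let nbits := max B 0
    let colors := (PySem.List.pyRange 0 (N * N) 1).map (fun c =>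
      pack_bits (PySem.List.slice solution (some (c * nbits)) (some ((c + 1) * nbits))))
    (PySem.List.pyRange 0 N 1).map (fun r =>
      PySem.List.slice colors (some (r * N)) (some ((r + 1) * N)))

-- ===== PRECONDITION & SPEC =====
-- Pre_ excludes exactly the inputs where Python A raises IndexError: N > 0 and B > 0 but
-- `solution` has fewer than N*N*B entries.
def Pre_solution_to_coloring (solution : List Int) (N : Int) (B : Int) (K : Int) : Prop :=
  0 < N → 0 < B → N * N * B ≤ (solution.length : Int)
instance (solution : List Int) (N : Int) (B : Int) (K : Int) : Decidable (Pre_solution_to_coloring solution N B K) := by unfold Pre_solution_to_coloring; infer_instance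

def pvWitness_solution_to_coloring : List Int × Int × Int × Int := ([1, 0, -1, 2, 0, 0, 1, 1], 2, 2, 3)

def Spec_solution_to_coloring (solution : List Int) (N : Int) (B : Int) (K : Int) (out : List (List Int)) : Prop := out = solution_to_coloring_alt solution N B K
instance (solution : List Int) (N : Int) (B : Int) (K : Int) (out : List (List Int)) : Decidable (Spec_solution_to_coloring solution N B K out) := by unfold Spec_solution_to_coloring; infer_instance

-- ===== CLAIM (what is proved, stated in full; the proofs are below) =====
def Claim_equal_solution_to_coloring : Prop := ∀ (solution : List Int) (N : Int) (B : Int) (K : Int), Dom_solution_to_coloring solution N B K → Pre_solution_to_coloring solution N B K → Spec_solution_to_coloring solution N B K (solution_to_coloring solution N B K)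

-- ===== LEMMAS AND PROOFS =====

-- Nat-level model pieces (proof-only)
def pvGet (sol : List Int) (k : Nat) : Int := sol.getD k 0
def pvColor (sol : List Int) (bb : Nat) (c : Nat) : Int :=
  (List.range bb).foldl (fun v b => if 0 < pvGet sol (c * bb + b) then PySem.Int.bor v ((1 : Int) <<< b) else v) 0
def pvGset (g : List (List Int)) (i j : Nat) (v : Int) : List (List Int) :=
  g.set i ((g.getD i []).set j v)
def pvGget (g : List (List Int)) (i j : Nat) : Int := (g.getD i []).getD j 0
def pvZ (n : Nat) : List (List Int) := (List.range n).map (fun _ => (List.range n).map (fun _ => (0 : Int)))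
def pvDims (n : Nat) (g : List (List Int)) : Prop := g.length = n ∧ ∀ r ∈ g, r.length = n

def pvModelA (sol : List Int) (n bb : Nat) : List (List Int) :=
  (List.range n).foldl (fun g i =>
    (List.range n).foldl (fun g j => pvGset g i j (pvColor sol bb (i * n + j))) g) (pvZ n)

def pvBuild (sol : List Int) (n bb : Nat) : List (List Int) :=
  (List.range (n * n)).foldl (fun g c => pvGset g (c / n) (c % n) (pvColor sol bb c)) (pvZ n)

def pvGrid (sol : List Int) (n bb : Nat) : List (List Int) :=
  (List.range n).map (fun i => (List.range n).map (fun j => pvColor sol bb (i * n + j)))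

-- getD/set basics specialised to our grid model
theorem pv_getD_set_self {A : Type} (l : List A) (i : Nat) (a : A) (h : i < l.length) (d : A) :
    (l.set i a).getD i d = a := by
  simp [List.getD, List.getElem?_set_self h]

theorem pv_getD_set_ne {A : Type} (l : List A) (i p : Nat) (a : A) (h : p ≠ i) (d : A) :
    (l.set i a).getD p d = l.getD p d := by
  simp [List.getD, List.getElem?_set_ne (Ne.symm h)]

theorem pv_gset_oob {g : List (List Int)} {i : Nat} (h : g.length ≤ i) (j : Nat) (v : Int) :
    pvGset g i j v = g := by
  simp [pvGset, List.set_eq_of_length_le h]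

theorem pvDims_gset {n : Nat} {g : List (List Int)} (hg : pvDims n g) (i j : Nat) (v : Int) :
    pvDims n (pvGset g i j v) := by
  rcases Nat.lt_or_ge i g.length with hi | hi
  · obtain ⟨h1, h2⟩ := hg
    refine ⟨by simpa [pvGset] using h1, ?_⟩
    intro r hr
    rcases List.mem_or_eq_of_mem_set hr with h | h
    · exact h2 r h
    · subst h
      have hr : (g.getD i []).length = n := by
        rw [List.getD_eq_getElem _ _ hi]; exact h2 _ (List.getElem_mem hi)
      simpa using hr
  · rwa [pv_gset_oob hi]

theorem pvGget_gset_self {n : Nat} {g : List (List Int)} (hg : pvDims n g) {i j : Nat}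
    (hi : i < n) (hj : j < n) (v : Int) : pvGget (pvGset g i j v) i j = v := by
  obtain ⟨h1, h2⟩ := hg
  have hi' : i < g.length := by omega
  have hrow : (g.getD i []).length = n := by
    rw [List.getD_eq_getElem _ _ hi']; exact h2 _ (List.getElem_mem hi')
  rw [pvGget, pvGset, pv_getD_set_self _ _ _ hi', pv_getD_set_self]
  omega

theorem pvGget_gset_ne {g : List (List Int)} {i j p q : Nat} (h : p ≠ i ∨ q ≠ j) (v : Int) :
    pvGget (pvGset g i j v) p q = pvGget g p q := by
  rcases Nat.lt_or_ge i g.length with hi | hi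
  · rcases h with h | h
    · rw [pvGget, pvGset, pv_getD_set_ne _ _ _ _ h, pvGget]
    · rw [pvGget, pvGset]
      by_cases hp : p = i
      · subst hp
        rw [pv_getD_set_self _ _ _ hi, pv_getD_set_ne _ _ _ _ h, pvGget]
      · rw [pv_getD_set_ne _ _ _ _ hp, pvGget]
  · rw [pv_gset_oob hi]

theorem pv_range_mul : ∀ (m k : Nat),
    List.range (m * k) = (List.range m).flatMap (fun i => (List.range k).map (fun j => i * k + j)) := by
  intro m k
  induction m with
  | zero => simp
  | succ m ih =>
    rw [Nat.succ_mul, List.range_add, ih, List.range_succ, List.flatMap_append]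
    simp [Nat.add_comm]

theorem pvZ_dims (n : Nat) : pvDims n (pvZ n) := by
  constructor
  · simp [pvZ]
  · intro r hr
    simp only [pvZ, List.mem_map] at hr
    obtain ⟨_, _, h⟩ := hr
    simp [← h]

-- fold of cell writes preserves dimensions
theorem pv_foldl_dims (sol : List Int) (n bb : Nat) :
    ∀ (cs : List Nat) (g : List (List Int)), pvDims n g →
      pvDims n (cs.foldl (fun g c => pvGset g (c / n) (c % n) (pvColor sol bb c)) g) := by
  intro cs
  induction cs with
  | nil => intro g hg; exact hg
  | cons c cs ih => intro g hg; exact ih _ (pvDims_gset hg _ _ _)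

-- entry characterization of the cell-write fold
theorem pv_foldl_gget (sol : List Int) (n bb : Nat) :
    ∀ (cs : List Nat) (g : List (List Int)), pvDims n g → (∀ c ∈ cs, c < n * n) →
      ∀ p q, p < n → q < n →
        pvGget (cs.foldl (fun g c => pvGset g (c / n) (c % n) (pvColor sol bb c)) g) p q
          = if p * n + q ∈ cs then pvColor sol bb (p * n + q) else pvGget g p q := by
  intro cs
  induction cs with
  | nil => intro g _ _ p q _ _; simp
  | cons c cs ih =>
    intro g hg hlt p q hp hq
    have hg' := pvDims_gset hg (c / n) (c % n) (pvColor sol bb c)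
    have ihe := ih _ hg' (fun c' hc' => hlt c' (by simp [hc'])) p q hp hq
    by_cases hm : p * n + q ∈ cs
    · rw [List.foldl_cons, ihe, if_pos hm, if_pos (by simp [hm])]
    · by_cases hc : p * n + q = c
      · have hdiv : c / n = p := by
          rw [← hc, Nat.mul_comm p n, Nat.mul_add_div (by omega : 0 < n), Nat.div_eq_of_lt hq]
          omega
        have hmod : c % n = q := by
          rw [← hc, Nat.mul_comm p n, Nat.mul_add_mod]; exact Nat.mod_eq_of_lt hq
        rw [List.foldl_cons, ihe, if_neg hm, hdiv, hmod, pvGget_gset_self hg hp hq,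
          if_pos (by simp [hc]), hc]
      · have hne : p ≠ c / n ∨ q ≠ c % n := by
          by_contra h
          push_neg at h
          have hd := Nat.div_add_mod c n
          rw [← h.1, ← h.2, Nat.mul_comm] at hd
          exact hc hd
        rw [List.foldl_cons, ihe, if_neg hm, pvGget_gset_ne hne,
          if_neg (by simp [hm, hc])]

theorem pv_getD_eq_getElem {A : Type} (l : List A) (i : Nat) (h : i < l.length) (d : A) :
    l.getD i d = l[i] := List.getD_eq_getElem l d h

theorem pv_build_grid (sol : List Int) (n bb : Nat) : pvBuild sol n bb = pvGrid sol n bb := by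
  have hd : pvDims n (pvBuild sol n bb) := by
    unfold pvBuild; exact pv_foldl_dims sol n bb _ _ (pvZ_dims n)
  apply List.ext_getElem
  · simp [pvGrid, hd.1]
  · intro i hi hi'
    have hin : i < n := by
      have := hd.1; simpa [pvGrid] using hi'
    have hrow : (pvBuild sol n bb)[i].length = n :=
      hd.2 _ (List.getElem_mem hi)
    apply List.ext_getElem
    · simp [pvGrid, hrow, hin]
    · intro j hj hj'
      have hjn : j < n := by rwa [hrow] at hj
      have hmem : i * n + j ∈ List.range (n * n) := by
        apply List.mem_range.2
        calc i * n + j < i * n + n := by omega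
          _ ≤ n * n := by nlinarith
      have hch : pvGget (pvBuild sol n bb) i j = pvColor sol bb (i * n + j) := by
        unfold pvBuild
        rw [pv_foldl_gget sol n bb (List.range (n * n)) (pvZ n) (pvZ_dims n)
          (fun c hc => List.mem_range.1 hc) i j hin hjn, if_pos hmem]
      have hb : pvGget (pvBuild sol n bb) i j = (pvBuild sol n bb)[i][j] := by
        rw [pvGget, pv_getD_eq_getElem _ _ (by omega : i < (pvBuild sol n bb).length),
          pv_getD_eq_getElem _ _ (by omega : j < (pvBuild sol n bb)[i].length)]
      rw [← hb, hch]
      simp [pvGrid]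

theorem pv_modelA_build (sol : List Int) (n bb : Nat) : pvModelA sol n bb = pvBuild sol n bb := by
  rw [pvModelA, pvBuild, pv_range_mul n n, List.foldl_flatMap]
  rw [PySem.List.foldl_congr_mem _ _ (fun g i =>
      ((List.range n).map (fun j => i * n + j)).foldl
        (fun g c => pvGset g (c / n) (c % n) (pvColor sol bb c)) g) _ ?_]
  intro acc i hi
  have hi' : i < n := List.mem_range.1 hi
  simp only [List.foldl_map]
  apply PySem.List.foldl_congr_mem
  intro g j hj
  have hj' : j < n := List.mem_range.1 hj
  have h1 : (i * n + j) / n = i := by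
    rw [Nat.mul_comm i n, Nat.mul_add_div (by omega), Nat.div_eq_of_lt hj']
    omega
  have h2 : (i * n + j) % n = j := by
    rw [Nat.mul_comm i n, Nat.mul_add_mod]; exact Nat.mod_eq_of_lt hj'
  simp only [h1, h2]

theorem pv_portA_model (sol : List Int) (N B K : Int) :
    solution_to_coloring sol N B K = pvModelA sol N.toNat B.toNat := by
  rcases Int.lt_or_le 0 N with hN | hN
  · obtain ⟨n, rfl⟩ : ∃ n : Nat, N = (n : Int) := ⟨N.toNat, by omega⟩
    rcases Int.lt_or_le 0 B with hB | hB
    · obtain ⟨bb, rfl⟩ : ∃ bb : Nat, B = (bb : Int) := ⟨B.toNat, by omega⟩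
      simp only [solution_to_coloring, pvModelA, PySem.List.pyRange_one, sub_zero, zero_add,
        Int.toNat_natCast, List.map_map, List.foldl_map, Function.comp_def, pvZ]
      apply PySem.List.foldl_congr_mem
      intro acc i _
      apply PySem.List.foldl_congr_mem
      intro g j _
      have hcol : (List.range bb).foldl (fun (color : Int) (b : Nat) =>
          if PySem.List.pyGetD sol
              (pixel_bit_to_int ((i : Int), (j : Int)) (b : Int) (n : Int) (bb : Int) - 1) 0 > 0
          then set_bit color (b : Int) else color) 0 = pvColor sol bb (i * n + j) := by
        rw [pvColor]
        apply PySem.List.foldl_congr_mem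
        intro v b _
        have hidx : pixel_bit_to_int ((i : Int), (j : Int)) (b : Int) (n : Int) (bb : Int) - 1
            = (((i * n + j) * bb + b : Nat) : Int) := by
          simp only [pixel_bit_to_int]
          push_cast
          ring
        rw [hidx, set_bit]
        simp only [PySem.List.pyGetD_natCast, Int.toNat_natCast, pvGet, gt_iff_lt]
        rfl
      rw [hcol]
      simp only [PySem.List.pySetD_natCast, PySem.List.pyGetD_natCast, pvGset]
    · have hb0 : B.toNat = 0 := by omega
      simp only [solution_to_coloring, pvModelA, PySem.List.pyRange_one, sub_zero, zero_add, hb0,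
        Int.toNat_natCast, List.map_map, List.foldl_map,
        Function.comp_def, pvZ, List.range_zero, List.foldl_nil, List.map_nil]
      apply PySem.List.foldl_congr_mem
      intro acc i _
      apply PySem.List.foldl_congr_mem
      intro g j _
      simp only [pvColor, List.range_zero, List.foldl_nil, PySem.List.pySetD_natCast,
        PySem.List.pyGetD_natCast, pvGset]
  · simp [solution_to_coloring, pvModelA, PySem.List.pyRange_one,
      (show N.toNat = 0 by omega), pvZ]

-- pack_bits on a full-length chunk of the solution computes pvColor
theorem pv_pack_chunk (sol : List Int) (bb c : Nat)
    (hlen : ((sol.drop (c * bb)).take bb).length = bb) :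
    pack_bits ((sol.drop (c * bb)).take bb) = pvColor sol bb c := by
  have hlen' : PySem.List.len ((sol.drop (c * bb)).take bb) = ((bb : Nat) : Int) := by
    simp [PySem.List.len, hlen]
  rw [pack_bits, PySem.List.enumerate_eq_map_pyRange (d := 0), List.foldl_map, hlen',
    PySem.List.pyRange_one, List.foldl_map, pvColor]
  simp only [sub_zero, Int.toNat_natCast]
  apply PySem.List.foldl_congr_mem
  intro v b hb
  have hb' : b < bb := List.mem_range.1 hb
  have hget : PySem.List.pyGetD ((sol.drop (c * bb)).take bb) (0 + (b : Int)) 0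
      = pvGet sol (c * bb + b) := by
    rw [zero_add, PySem.List.pyGetD_natCast, pvGet, List.getD, List.getD,
      List.getElem?_take_of_lt hb', List.getElem?_drop]
  rw [hget]
  simp only [zero_add, Int.toNat_natCast, gt_iff_lt]

theorem pv_portB_grid (sol : List Int) (N B K : Int)
    (hpre : 0 < N → 0 < B → N * N * B ≤ (sol.length : Int)) :
    solution_to_coloring_alt sol N B K = pvGrid sol N.toNat B.toNat := by
  rcases Int.lt_or_le 0 N with hN | hN
  · obtain ⟨n, rfl⟩ : ∃ n : Nat, N = (n : Int) := ⟨N.toNat, by omega⟩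
    set bb := B.toNat with hbb
    have hmax : max B 0 = ((bb : Nat) : Int) := by rw [hbb]; omega
    have hlen : ∀ c : Nat, c < n * n → ((sol.drop (c * bb)).take bb).length = bb := by
      intro c hc
      rcases Nat.eq_zero_or_pos bb with h0 | h0
      · simp [h0]
      · have hB : 0 < B := by omega
        have hBi : B = ((bb : Nat) : Int) := by omega
        have h2 : ((n * n * bb : Nat) : Int) ≤ (sol.length : Int) := by
          have := hpre hN hB
          rw [hBi] at this
          push_cast
          linarith
        have h2' : n * n * bb ≤ sol.length := by exact_mod_cast h2
        have hle : (c + 1) * bb ≤ sol.length :=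
          le_trans (Nat.mul_le_mul_right _ (by omega)) h2'
        rw [Nat.succ_mul] at hle
        simp only [List.length_take, List.length_drop]
        omega
    have hcolors : ∀ c : Nat, c < n * n →
        pack_bits (PySem.List.slice sol (some ((c : Int) * bb)) (some (((c : Int) + 1) * bb)))
          = pvColor sol bb c := by
      intro c hc
      have h1 : (c : Int) * bb = ((c * bb : Nat) : Int) := by push_cast; ring
      have h2 : ((c : Int) + 1) * bb = (((c * bb : Nat) : Int) + ((bb : Nat) : Int)) := by
        push_cast; ring
      rw [h1, h2, PySem.List.slice_natCast_add, pv_pack_chunk sol bb c (hlen c hc)]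
    have hNN : ((n : Int)) * n = ((n * n : Nat) : Int) := by push_cast; ring
    have e1 : PySem.List.pyRange 0 ((n * n : Nat) : Int) 1
        = (List.range (n * n)).map (fun k : Nat => ((k : Nat) : Int)) := by
      rw [PySem.List.pyRange_one, sub_zero, Int.toNat_natCast]
      simp
    have e2 : PySem.List.pyRange 0 ((n : Nat) : Int) 1
        = (List.range n).map (fun k : Nat => ((k : Nat) : Int)) := by
      rw [PySem.List.pyRange_one, sub_zero, Int.toNat_natCast]
      simp
    simp only [Int.toNat_natCast]
    simp only [solution_to_coloring_alt, hmax, hNN, e1, e2, List.map_map, Function.comp_def]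
    rw [if_neg (by omega : ¬ ((n : Nat) : Int) ≤ 0)]
    -- both sides are maps over List.range n: compare row by row
    rw [pvGrid]
    apply List.map_congr_left
    intro r hr
    have hrn : r < n := List.mem_range.1 hr
    have hmapc : (List.range (n * n)).map
          (fun c : Nat => pack_bits (PySem.List.slice sol (some ((c : Int) * bb))
            (some (((c : Int) + 1) * bb))))
        = (List.range (n * n)).map (pvColor sol bb) :=
      List.map_congr_left (fun c hc => hcolors c (List.mem_range.1 hc))
    rw [hmapc]
    have h1 : (r : Int) * n = ((r * n : Nat) : Int) := by push_cast; ring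
    have h2 : ((r : Int) + 1) * n = (((r * n : Nat) : Int) + ((n : Nat) : Int)) := by
      push_cast; ring
    rw [h1, h2, PySem.List.slice_natCast_add]
    -- ((range (n*n)).map f).drop (r*n) |>.take n = (range n).map (fun j => f (r*n + j))
    have hm : n * n = r * n + (n * n - r * n) := by
      have : r * n ≤ n * n := Nat.mul_le_mul_right _ (by omega)
      omega
    have hnm : n ≤ n * n - r * n := by nlinarith
    conv_lhs => rw [hm]
    rw [List.range_add, List.map_append]
    have hl1 : ((List.range (r * n)).map (pvColor sol bb)).length = r * n := by simp
    rw [List.drop_left' hl1, List.map_map, ← List.map_take, List.take_range,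
      Nat.min_eq_left hnm]
    simp [Function.comp_def]
  · have hn0 : N.toNat = 0 := by omega
    simp [solution_to_coloring_alt, pvGrid, hn0, hN]

-- ===== VERDICT (by name: the statement is the Claim_ definition above) =====
theorem solution_to_coloring_spec : Claim_equal_solution_to_coloring := by
  intro sol N B K _ hpre
  unfold Spec_solution_to_coloring
  rw [pv_portA_model, pv_modelA_build, pv_build_grid, pv_portB_grid sol N B K hpre]
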